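-- pv_equiv track=rewrite | github.com/ifest1/LabProg | linear_robot.py | rec
-- ===== SOURCE A (Python) =====
-- def rec(s):
--     if not s:
--         return 0
--     else:
--         if s.pop() == 'f':
--             return rec(s) + 1
--         else:
--             return rec(s) - 1
-- ===== SOURCE B (Python) =====
-- def rec(s):
--     total = 0
--     while s:
--         total += 1 if s.pop() == 'f' else -1
--     return total
-- ===== Notes on version B (the rewrite author's own statement) =====
-- stated objective: simpler
-- what changed: Replaces the recursion with an iterative while-loop that pops elements and keeps a running total accumulator (same emptying side effect on s).
import Mathlib
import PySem

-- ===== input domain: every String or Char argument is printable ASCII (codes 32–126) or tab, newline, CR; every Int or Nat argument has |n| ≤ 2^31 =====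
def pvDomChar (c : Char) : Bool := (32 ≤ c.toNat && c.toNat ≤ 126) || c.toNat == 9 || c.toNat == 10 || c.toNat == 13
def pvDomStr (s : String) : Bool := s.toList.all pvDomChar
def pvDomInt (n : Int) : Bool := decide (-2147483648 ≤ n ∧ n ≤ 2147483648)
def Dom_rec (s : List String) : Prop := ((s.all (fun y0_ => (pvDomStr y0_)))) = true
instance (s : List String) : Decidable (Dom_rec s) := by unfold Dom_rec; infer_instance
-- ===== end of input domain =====

-- Header: B replaces A's recursion (pop last, recurse, ±1) with an iterative loop with a
-- running total (simpler decomposition). Both A and B empty the list s in place in Python;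
-- the theorem here is about the RETURN value only.

-- ===== PORT A =====
-- A pops the LAST element and recurses on the rest; ported as recursion on s.reverse
-- (head of the reverse = the popped element).
def recAuxA : List String → Int
  | [] => 0
  | x :: xs => if x = "f" then recAuxA xs + 1 else recAuxA xs - 1

def rec (s : List String) : Int := recAuxA s.reverse

-- ===== PORT B =====
-- B's while-loop pops the last element each iteration and updates the accumulator;
-- ported as a left fold of the accumulator update over s.reverse.
def rec_alt (s : List String) : Int :=
  s.reverse.foldl (fun total x => total + (if x = "f" then 1 else -1)) 0

-- ===== PRECONDITION & SPEC =====
def Spec_rec (s : List String) (out : Int) : Prop := out = rec_alt s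
instance (s : List String) (out : Int) : Decidable (Spec_rec s out) := by unfold Spec_rec; infer_instance

-- ===== CLAIM (what is proved, stated in full; the proofs are below) =====
def Claim_equal_rec : Prop := ∀ (s : List String), Dom_rec s → Spec_rec s (rec s)

-- ===== LEMMAS AND PROOFS =====
theorem foldl_eq_recAuxA (l : List String) (t : Int) :
    l.foldl (fun total x => total + (if x = "f" then 1 else -1)) t = t + recAuxA l := by
  induction l generalizing t with
  | nil => simp [recAuxA]
  | cons x xs ih =>
    simp only [List.foldl, recAuxA]
    rw [ih]
    split_ifs <;> ring

-- ===== VERDICT (by name: the statement is the Claim_ definition above) =====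
theorem rec_spec : Claim_equal_rec := by
  intro s _
  unfold Spec_rec rec rec_alt
  rw [foldl_eq_recAuxA]
  ring
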